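-- pv_equiv track=rewrite | github.com/bakerston/computational-biophysics | hbond_snap.py | sored_count_freq
-- ===== SOURCE A (Python) =====
-- from collections import Counter
--
-- def sored_count_freq(data_in):
--     mono=[]
--     tmp_chain=[]
--     for x in range(len(data_in)):
--         for y in range(len(data_in[x])):
--             mono.append(data_in[x][y][0])
--             tmp_chain.append(data_in[x][y][1])
--     chain=[x%37 for x in tmp_chain]
--     mono_count=Counter(mono)
--     chain_count=Counter(chain)
--
--     mono_comb = list(zip(mono_count.keys(), mono_count.values()))
--     mono_comb.sort(key=lambda x: x[0])
--
--     chain_comb= list(zip(chain_count.keys(),chain_count.values()))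
--     chain_comb.sort(key=lambda x: x[0])
--     return [mono_comb, chain_comb]
-- ===== SOURCE B (Python) =====
-- def sored_count_freq(data_in):
--     mono = [p[0] for grp in data_in for p in grp]
--     chain = [p[1] % 37 for grp in data_in for p in grp]
--
--     def rle(xs):
--         out = []
--         rest = sorted(xs)
--         while rest:
--             v = rest[0]
--             k = 1
--             while k < len(rest) and rest[k] == v:
--                 k += 1
--             out.append((v, k))
--             rest = rest[k:]
--         return out
--
--     return [rle(mono), rle(chain)]
-- ===== Notes on version B (the rewrite author's own statement) =====
-- stated objective: alternative
-- what changed: Replaces the Counter-then-sort-the-(key,count)-pairs strategy with a sort-then-run-length-scan: each flattened list is sorted first and a single pass over the sorted list emits the (value,count) pairs already in ascending key order.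
import Mathlib
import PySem

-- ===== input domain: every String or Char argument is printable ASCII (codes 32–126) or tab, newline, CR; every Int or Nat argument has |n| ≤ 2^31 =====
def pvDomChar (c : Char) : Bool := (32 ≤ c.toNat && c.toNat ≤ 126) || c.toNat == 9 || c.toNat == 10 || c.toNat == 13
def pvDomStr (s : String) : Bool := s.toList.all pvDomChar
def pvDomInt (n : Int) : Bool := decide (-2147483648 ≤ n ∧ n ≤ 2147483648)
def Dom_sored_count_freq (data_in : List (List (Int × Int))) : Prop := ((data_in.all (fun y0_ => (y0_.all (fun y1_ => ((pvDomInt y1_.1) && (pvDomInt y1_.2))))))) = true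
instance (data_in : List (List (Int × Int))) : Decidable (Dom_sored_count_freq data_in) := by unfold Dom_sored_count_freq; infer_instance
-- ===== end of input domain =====

-- B replaces Counter-then-sort-keys by sort-then-run-length-scan (alternative decomposition, same cost).

-- ===== PORT A =====
-- the two index loops append field 0 / field 1 of every leaf to mono / tmp_chain
def sored_count_freq (data_in : List (List (Int × Int))) : List (List (Int × Int)) :=
  let st := data_in.foldl
    (fun (st : List Int × List Int) row =>
      row.foldl (fun st p => (st.1 ++ [p.1], st.2 ++ [p.2])) st) ([], [])
  let mono := st.1
  let tmp_chain := st.2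
  let chain := tmp_chain.map (fun x => PySem.Int.mod x 37)
  let mono_count := PySem.Dict.counter mono
  let chain_count := PySem.Dict.counter chain
  let mono_comb := PySem.List.sorted (List.zip mono_count.keys mono_count.values)
    (fun p => p.1) false
  let chain_comb := PySem.List.sorted (List.zip chain_count.keys chain_count.values)
    (fun p => p.1) false
  [mono_comb, chain_comb]

-- ===== PORT B =====
-- the while-loop of Source B: peel off the run of the head value, emit (value, run length), recurse on the rest
def pvRle : List Int → List (Int × Int)
  | [] => []
  | x :: xs =>
      (x, 1 + ((xs.takeWhile (· == x)).length : Int)) :: pvRle (xs.dropWhile (· == x))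
  termination_by l => l.length
  decreasing_by
    have := (List.dropWhile_sublist (l := xs) (p := (· == x))).length_le
    simp; omega

def sored_count_freq_alt (data_in : List (List (Int × Int))) : List (List (Int × Int)) :=
  let mono := data_in.flatMap (fun grp => grp.map (fun p => p.1))
  let chain := data_in.flatMap (fun grp => grp.map (fun p => PySem.Int.mod p.2 37))
  [pvRle (PySem.List.sorted mono (fun x => x) false),
   pvRle (PySem.List.sorted chain (fun x => x) false)]

-- ===== PRECONDITION & SPEC =====
def Spec_sored_count_freq (data_in : List (List (Int × Int))) (out : List (List (Int × Int))) : Prop := out = sored_count_freq_alt data_in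
instance (data_in : List (List (Int × Int))) (out : List (List (Int × Int))) : Decidable (Spec_sored_count_freq data_in out) := by unfold Spec_sored_count_freq; infer_instance

-- ===== CLAIM (what is proved, stated in full; the proofs are below) =====
def Claim_equal_sored_count_freq : Prop := ∀ (data_in : List (List (Int × Int))), Dom_sored_count_freq data_in → Spec_sored_count_freq data_in (sored_count_freq data_in)

-- ===== LEMMAS AND PROOFS =====

-- facts about the head run of a (≤)-sorted cons list
lemma pv_takeWhile_eq (x : Int) (xs : List Int) :
    ∀ y ∈ xs.takeWhile (· == x), y = x := by
  intro y hy
  have := List.mem_takeWhile_imp hy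
  simpa using this

lemma pv_not_mem_dropWhile (x : Int) :
    ∀ (xs : List Int), xs.Pairwise (· ≤ ·) → (∀ y ∈ xs, x ≤ y) →
      x ∉ xs.dropWhile (· == x) := by
  intro xs
  induction xs with
  | nil => simp
  | cons y ys ih =>
    intro hp hb
    rw [List.pairwise_cons] at hp
    by_cases h : y = x
    · subst h
      rw [List.dropWhile_cons_of_pos (by simp)]
      exact ih hp.2 (fun z hz => hp.1 z hz)
    · rw [List.dropWhile_cons_of_neg (by simpa using h)]
      intro hmem
      rcases List.mem_cons.1 hmem with h1 | h1
      · exact h h1.symm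
      · have h2 := hp.1 x h1
        have h3 := hb y (by simp)
        omega

lemma pv_count_cons_self (x : Int) (xs : List Int)
    (hp : (x :: xs).Pairwise (· ≤ ·)) :
    ((x :: xs).count x : Int) = 1 + ((xs.takeWhile (· == x)).length : Int) := by
  rw [List.pairwise_cons] at hp
  have hnd : x ∉ xs.dropWhile (· == x) :=
    pv_not_mem_dropWhile x xs hp.2 (fun y hy => hp.1 y hy)
  have hsplit : xs.takeWhile (· == x) ++ xs.dropWhile (· == x) = xs :=
    List.takeWhile_append_dropWhile
  have hct : (xs.takeWhile (· == x)).count x = (xs.takeWhile (· == x)).length := by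
    rw [List.count_eq_length]
    intro y hy
    simpa using (pv_takeWhile_eq x xs y hy).symm
  have hcd : (xs.dropWhile (· == x)).count x = 0 := List.count_eq_zero.2 hnd
  have : xs.count x = (xs.takeWhile (· == x)).length := by
    conv_lhs => rw [← hsplit]
    rw [List.count_append, hct, hcd]
    omega
  rw [List.count_cons_self, this]
  push_cast
  ring

lemma pv_count_cons_other (x k : Int) (xs : List Int) (hk : k ≠ x) :
    (x :: xs).count k = (xs.dropWhile (· == x)).count k := by
  have hsplit : xs.takeWhile (· == x) ++ xs.dropWhile (· == x) = xs :=
    List.takeWhile_append_dropWhile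
  have hct : (xs.takeWhile (· == x)).count k = 0 :=
    List.count_eq_zero.2 (fun hmem => hk (pv_takeWhile_eq x xs k hmem))
  have hc : (x :: xs).count k = xs.count k := by
    simp [List.count_cons]
    exact fun h => hk h.symm
  rw [hc]
  conv_lhs => rw [← hsplit]
  rw [List.count_append, hct]
  omega

lemma pv_drop_pairwise (x : Int) (xs : List Int)
    (hp : (x :: xs).Pairwise (· ≤ ·)) :
    (xs.dropWhile (· == x)).Pairwise (· ≤ ·) :=
  ((List.pairwise_cons.1 hp).2).sublist (List.dropWhile_sublist _)

lemma pv_drop_gt (x : Int) (xs : List Int)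
    (hp : (x :: xs).Pairwise (· ≤ ·)) :
    ∀ y ∈ xs.dropWhile (· == x), x < y := by
  rw [List.pairwise_cons] at hp
  intro y hy
  have h1 : x ≤ y := hp.1 y ((List.dropWhile_sublist _).subset hy)
  have h2 : y ≠ x := by
    intro h; subst h
    exact pv_not_mem_dropWhile y xs hp.2 (fun z hz => hp.1 z hz) hy
  omega

-- every key emitted by pvRle is an element of the list
lemma pv_rle_fst_mem : ∀ (s : List Int), ∀ p ∈ pvRle s, p.1 ∈ s := by
  intro s
  induction s using pvRle.induct with
  | case1 => simp [pvRle]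
  | case2 x xs ih =>
    intro p hp
    rw [pvRle] at hp
    rcases List.mem_cons.1 hp with h | h
    · subst h; simp
    · exact List.mem_cons_of_mem _ ((List.dropWhile_sublist _).subset (ih p h))

-- every element of the list appears as a key of pvRle
lemma pv_mem_rle_fst : ∀ (s : List Int), ∀ k ∈ s, ∃ p ∈ pvRle s, p.1 = k := by
  intro s
  induction s using pvRle.induct with
  | case1 => simp
  | case2 x xs ih =>
    intro k hk
    rcases List.mem_cons.1 hk with h | h
    · exact ⟨(x, 1 + ((xs.takeWhile (· == x)).length : Int)), by rw [pvRle]; simp, h.symm⟩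
    · have hsplit : xs.takeWhile (· == x) ++ xs.dropWhile (· == x) = xs :=
        List.takeWhile_append_dropWhile
      rw [← hsplit, List.mem_append] at h
      rcases h with h | h
      · exact ⟨(x, 1 + ((xs.takeWhile (· == x)).length : Int)), by rw [pvRle]; simp,
          (pv_takeWhile_eq x xs k h).symm⟩
      · obtain ⟨p, hp, hpk⟩ := ih k h
        exact ⟨p, by rw [pvRle]; exact List.mem_cons_of_mem _ hp, hpk⟩

-- on a (≤)-sorted list the emitted count is the multiplicity
lemma pv_rle_snd : ∀ (s : List Int), s.Pairwise (· ≤ ·) →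
    ∀ p ∈ pvRle s, p.2 = (s.count p.1 : Int) := by
  intro s
  induction s using pvRle.induct with
  | case1 => simp [pvRle]
  | case2 x xs ih =>
    intro hp p hmem
    rw [pvRle] at hmem
    rcases List.mem_cons.1 hmem with h | h
    · subst h
      exact (pv_count_cons_self x xs hp).symm
    · have hd := pv_drop_pairwise x xs hp
      have hk : p.1 ∈ xs.dropWhile (· == x) := pv_rle_fst_mem _ p h
      have hkx : p.1 ≠ x := by
        intro he
        have := pv_drop_gt x xs hp p.1 hk
        omega
      rw [ih hd p h, pv_count_cons_other x p.1 xs hkx]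

-- on a (≤)-sorted list the emitted keys are strictly increasing
lemma pv_rle_pairwise : ∀ (s : List Int), s.Pairwise (· ≤ ·) →
    (pvRle s).Pairwise (fun a b => a.1 < b.1) := by
  intro s
  induction s using pvRle.induct with
  | case1 => simp [pvRle]
  | case2 x xs ih =>
    intro hp
    rw [pvRle]
    refine List.pairwise_cons.2 ⟨?_, ih (pv_drop_pairwise x xs hp)⟩
    intro p hmem
    exact pv_drop_gt x xs hp p.1 (pv_rle_fst_mem _ p hmem)

-- the per-list core: sorted Counter items = run-length scan of the sorted list
lemma pv_key (l : List Int) :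
    PySem.List.sorted ((PySem.Dict.counter l).items) (fun p : Int × Int => p.1) false
      = pvRle (PySem.List.sorted l (fun x => x) false) := by
  set s := PySem.List.sorted l (fun x => x) false with hs
  have hsp : s.Pairwise (· ≤ ·) := by
    have := PySem.List.sorted_pairwise (xs := l) (key := fun x : Int => x)
    simpa [hs] using this
  have hperm_sl : s.Perm l := PySem.List.sorted_perm l (fun x => x) false
  have hpair := pv_rle_pairwise s hsp
  refine PySem.List.sorted_eq_of_perm_of_pairwise_lt _ _ _ ?_ hpair
  rw [PySem.Dict.items_counter]
  have h1 : pvRle s = ((pvRle s).map Prod.fst).map (fun k => (k, (l.count k : Int))) := by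
    rw [List.map_map]
    conv_lhs => rw [← List.map_id (pvRle s)]
    apply List.map_congr_left
    intro p hp
    have h2 := pv_rle_snd s hsp p hp
    have h3 : s.count p.1 = l.count p.1 := hperm_sl.count_eq p.1
    simp only [id, Function.comp]
    ext
    · rfl
    · simp [h2, h3]
  have hnd1 : ((pvRle s).map Prod.fst).Nodup := by
    have := List.pairwise_map.2 hpair
    exact this.imp (fun h => ne_of_lt h)
  have hmemiff : ∀ a, a ∈ (pvRle s).map Prod.fst ↔ a ∈ PySem.Set.ofList l := by
    intro a
    rw [PySem.Set.mem_ofList, List.mem_map]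
    constructor
    · rintro ⟨p, hp, rfl⟩
      exact hperm_sl.subset (pv_rle_fst_mem s p hp)
    · intro ha
      obtain ⟨p, hp, hpk⟩ := pv_mem_rle_fst s a (hperm_sl.mem_iff.2 ha)
      exact ⟨p, hp, hpk⟩
  have h2 : ((pvRle s).map Prod.fst).Perm (PySem.Set.ofList l) :=
    (List.perm_ext_iff_of_nodup hnd1 (PySem.Set.nodup_ofList l)).2 hmemiff
  rw [h1]
  exact h2.map _

-- A's two appending index loops flatten the same way B's comprehensions do
lemma pv_flatten (data_in : List (List (Int × Int))) :
    ∀ (a b : List Int),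
      data_in.foldl
        (fun (st : List Int × List Int) row =>
          row.foldl (fun st p => (st.1 ++ [p.1], st.2 ++ [p.2])) st) (a, b)
      = (a ++ data_in.flatMap (fun g => g.map (fun p => p.1)),
         b ++ data_in.flatMap (fun g => g.map (fun p => p.2))) := by
  induction data_in with
  | nil => simp
  | cons row rest ih =>
    intro a b
    have hrow : ∀ (a b : List Int),
        row.foldl (fun (st : List Int × List Int) p => (st.1 ++ [p.1], st.2 ++ [p.2])) (a, b)
        = (a ++ row.map (fun p => p.1), b ++ row.map (fun p => p.2)) := by
      induction row with
      | nil => simp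
      | cons p ps ihr => intro a b; simp [ihr, List.append_assoc]
    simp only [List.foldl_cons, hrow, ih, List.flatMap_cons]
    simp [List.append_assoc]

-- keys zipped with values are the items list
lemma pv_zip_items (d : PySem.Dict Int Int) :
    List.zip d.keys d.values = d.items :=
  Eq.symm (List.zip_of_prod rfl rfl)

-- ===== VERDICT (by name: the statement is the Claim_ definition above) =====
theorem sored_count_freq_spec : Claim_equal_sored_count_freq := by
  intro data_in _
  unfold Spec_sored_count_freq sored_count_freq sored_count_freq_alt
  simp only [pv_flatten data_in [] [], List.nil_append, pv_zip_items]
  have hmap : (data_in.flatMap (fun g => g.map (fun p => p.2))).map (fun x => PySem.Int.mod x 37)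
      = data_in.flatMap (fun grp => grp.map (fun p => PySem.Int.mod p.2 37)) := by
    rw [List.map_flatMap]
    simp [List.map_map, Function.comp_def]
  rw [hmap, pv_key, pv_key]
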